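-- pv_equiv track=rewrite | github.com/sleepyMS/programmers_solution | N으로 표현.py | solution
-- ===== SOURCE A (Python) =====
-- def solution(N, number):
--     if N == number:
--         return 1
--
--     S = [set() for _ in range(9)]
--
--     for k in range(1, 9):
--         S[k].add(int(str(N) * k))
--
--         for i in range(1, k):
--             for a in S[i]:
--                 for b in S[k-i]:
--                     S[k].add(a + b)
--                     S[k].add(a - b)
--                     S[k].add(a * b)
--                     if b != 0:
--                         S[k].add(a // b)
--
--         if number in S[k]:
--             return k
--
--     return -1
-- ===== SOURCE B (Python) =====
-- def solution(N, number):
--     if N == number: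
--         return 1
--     memo = {}
--
--     def build(k):
--         # set of values expressible with exactly k copies of N (top-down, memoized)
--         if k in memo:
--             return memo[k]
--         vals = [int(str(N) * k)]
--         for i in range(1, k):
--             for a in build(i):
--                 for b in build(k - i):
--                     vals.append(a + b)
--                     vals.append(a - b)
--                     vals.append(a * b)
--                     if b != 0:
--                         vals.append(a // b)
--         s = frozenset(vals)
--         memo[k] = s
--         return s
--
--     for k in range(1, 9):
--         if number in build(k):
--             return k
--     return -1
-- ===== Notes on version B (the rewrite author's own statement) =====
-- stated objective: alternative
-- what changed: Replaces A's bottom-up 9-slot array of sets mutated by incremental .add calls with a top-down memoized recursion build(k) that collects all candidate values in a flat list and deduplicates once with frozenset, scanned for the first k containing number.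
import Mathlib
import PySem

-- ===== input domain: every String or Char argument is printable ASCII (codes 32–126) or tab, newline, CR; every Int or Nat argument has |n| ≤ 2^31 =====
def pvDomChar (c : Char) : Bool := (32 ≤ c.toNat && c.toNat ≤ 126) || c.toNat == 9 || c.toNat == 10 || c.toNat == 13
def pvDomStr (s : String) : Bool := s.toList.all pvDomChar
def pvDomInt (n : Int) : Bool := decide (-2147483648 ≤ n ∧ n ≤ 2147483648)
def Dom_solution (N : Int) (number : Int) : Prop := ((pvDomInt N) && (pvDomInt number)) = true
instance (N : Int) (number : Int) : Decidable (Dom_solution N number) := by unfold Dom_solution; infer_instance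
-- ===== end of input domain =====

-- B replaces A's bottom-up array-of-sets with incremental adds by a top-down memoized
-- recursion collecting candidates in a flat list deduplicated once (alternative decomposition, same cost).
-- Python's 'set' (a hash set, consumed here only order-insensitively: membership tests and building
-- further sets) is modelled by Std.HashSet Int; both ports keep their Python's loops step for step.


-- ===== PORT A =====
-- int(str(N) * k), via PySem (exact); total stand-in value 0 where Python raises ValueError (excluded by Pre_)
def pvRep (N : Int) (k : Nat) : Int :=
  (PySem.Int.ofChars? (PySem.List.pyRepeat (PySem.Int.toChars N) (k : Int))).getD 0

-- the four S[k].add(...) calls of A's innermost loop body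
def pvAddOps (acc : Std.HashSet Int) (a b : Int) : Std.HashSet Int :=
  let s := ((acc.insert (a + b)).insert (a - b)).insert (a * b)
  if b ≠ 0 then s.insert (PySem.Int.floordiv a b) else s

-- the 'for k in range(1, 9)' loop with its early return, carrying the list S of 9 sets
def solutionLoop (N number : Int) (S : List (Std.HashSet Int)) (k : Nat) : Int :=
  if k ≥ 9 then -1
  else
    let sk := (List.range' 1 (k - 1)).foldl (fun acc i =>
        (S.getD i ∅).toList.foldl (fun acc a =>
          (S.getD (k - i) ∅).toList.foldl (fun acc b => pvAddOps acc a b) acc) acc)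
      ((S.getD k ∅).insert (pvRep N k))
    if sk.contains number then (k : Int)
    else solutionLoop N number (S.set k sk) (k + 1)
  termination_by 9 - k

def solution (N : Int) (number : Int) : Int :=
  if N = number then 1
  else solutionLoop N number (List.replicate 9 ∅) 1

-- ===== PORT B =====
-- the candidate values Source B appends for one pair (a, b)
def pvCand (a b : Int) : List Int :=
  [a + b, a - b, a * b] ++ (if b ≠ 0 then [PySem.Int.floordiv a b] else [])

-- Source B's build(k): flat candidate list, deduplicated once (Source B's memo dict is an evaluation cache)
def buildB (N : Int) (k : Nat) : Std.HashSet Int :=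
  Std.HashSet.ofList (pvRep N k ::
    (List.range' 1 (k - 1)).attach.flatMap (fun i =>
      (buildB N i.1).toList.flatMap (fun a =>
        (buildB N (k - i.1)).toList.flatMap (fun b => pvCand a b))))
  termination_by k
  decreasing_by
  · have := i.2; rw [List.mem_range'_1] at this; omega
  · have := i.2; rw [List.mem_range'_1] at this; omega

-- Source B's final scan 'for k in range(1, 9): if number in build(k): return k'
def scanB (N number : Int) (k : Nat) : Int :=
  if k ≥ 9 then -1
  else if (buildB N k).contains number then (k : Int)
  else scanB N number (k + 1)
  termination_by 9 - k

def solution_alt (N : Int) (number : Int) : Int :=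
  if N = number then 1
  else scanB N number 1

-- ===== PRECONDITION & SPEC =====
-- Pre_ excludes exactly the inputs where the Python A raises ValueError: N < 0 with N ≠ number
-- (int(str(N)*k) for k ≥ 2 parses e.g. "-3-3"); B's Python raises there identically.
def Pre_solution (N : Int) (number : Int) : Prop := 0 ≤ N ∨ N = number
instance (N : Int) (number : Int) : Decidable (Pre_solution N number) := by unfold Pre_solution; infer_instance
def pvWitness_solution : Int × Int := (5, 12)

def Spec_solution (N : Int) (number : Int) (out : Int) : Prop := out = solution_alt N number
instance (N : Int) (number : Int) (out : Int) : Decidable (Spec_solution N number out) := by unfold Spec_solution; infer_instance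

-- ===== CLAIM (what is proved, stated in full; the proofs are below) =====
def Claim_equal_solution : Prop := ∀ (N : Int) (number : Int), Dom_solution N number → Pre_solution N number → Spec_solution N number (solution N number)

-- ===== LEMMAS AND PROOFS =====

-- a fold that only adds elements of g a: membership characterisation
theorem pv_mem_foldl_gen {α : Type} (f : Std.HashSet Int → α → Std.HashSet Int) (g : α → List Int)
    (hf : ∀ acc a x, x ∈ f acc a ↔ x ∈ acc ∨ x ∈ g a) (l : List α) (acc : Std.HashSet Int) (x : Int) :
    x ∈ l.foldl f acc ↔ x ∈ acc ∨ ∃ a ∈ l, x ∈ g a := by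
  induction l generalizing acc with
  | nil => simp
  | cons h t ih => simp only [List.foldl_cons, ih, hf, List.mem_cons]; aesop

theorem pv_mem_addOps (acc : Std.HashSet Int) (a b x : Int) :
    x ∈ pvAddOps acc a b ↔ x ∈ acc ∨ x ∈ pvCand a b := by
  by_cases hb : b = 0 <;>
    simp only [pvAddOps, pvCand, hb, ne_eq, not_true_eq_false, not_false_eq_true, ite_true,
      ite_false, Std.HashSet.mem_insert, beq_iff_eq, List.mem_append,
      List.mem_cons, List.not_mem_nil, or_false] <;> aesop

theorem pv_mem_fold_b (lb : List Int) (a : Int) (acc : Std.HashSet Int) (x : Int) :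
    x ∈ lb.foldl (fun acc b => pvAddOps acc a b) acc ↔ x ∈ acc ∨ ∃ b ∈ lb, x ∈ pvCand a b :=
  pv_mem_foldl_gen _ (pvCand a) (fun acc b x => pv_mem_addOps acc a b x) lb acc x

theorem pv_mem_fold_a (la lb : List Int) (acc : Std.HashSet Int) (x : Int) :
    x ∈ la.foldl (fun acc a => lb.foldl (fun acc b => pvAddOps acc a b) acc) acc ↔
      x ∈ acc ∨ ∃ a ∈ la, ∃ b ∈ lb, x ∈ pvCand a b := by
  rw [pv_mem_foldl_gen _ (fun a => lb.flatMap (fun b => pvCand a b))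
        (fun acc a x => by rw [pv_mem_fold_b, List.mem_flatMap])]
  simp only [List.mem_flatMap]

set_option maxRecDepth 4096 in
theorem pv_mem_fold_i (k : Nat) (S : List (Std.HashSet Int)) (acc : Std.HashSet Int) (x : Int) :
    x ∈ (List.range' 1 (k - 1)).foldl (fun acc i =>
        (S.getD i ∅).toList.foldl (fun acc a =>
          (S.getD (k - i) ∅).toList.foldl (fun acc b => pvAddOps acc a b) acc) acc) acc ↔
      x ∈ acc ∨ ∃ i ∈ List.range' 1 (k - 1), ∃ a ∈ (S.getD i ∅).toList,
        ∃ b ∈ (S.getD (k - i) ∅).toList, x ∈ pvCand a b := by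
  rw [pv_mem_foldl_gen _
        (fun i => (S.getD i ∅).toList.flatMap (fun a => (S.getD (k - i) ∅).toList.flatMap (fun b => pvCand a b)))
        (fun acc i x => by rw [pv_mem_fold_a]; simp only [List.mem_flatMap])]
  simp only [List.mem_flatMap]

theorem pv_mem_buildB (N : Int) (k : Nat) (x : Int) :
    x ∈ buildB N k ↔ x = pvRep N k ∨
      ∃ i ∈ List.range' 1 (k - 1), ∃ a ∈ buildB N i, ∃ b ∈ buildB N (k - i), x ∈ pvCand a b := by
  rw [buildB, Std.HashSet.mem_ofList]
  simp only [List.contains_eq_mem, decide_eq_true_eq, List.mem_cons, List.mem_flatMap,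
    List.mem_attach, true_and, Subtype.exists, Std.HashSet.mem_toList]
  constructor
  · rintro (h | ⟨i, hi, a, ha, b, hb, hc⟩)
    · exact Or.inl h
    · exact Or.inr ⟨i, hi, a, ha, b, hb, hc⟩
  · rintro (h | ⟨i, hi, a, ha, b, hb, hc⟩)
    · exact Or.inl h
    · exact Or.inr ⟨i, hi, a, ha, b, hb, hc⟩

-- the freshly built S[k] has exactly the members of buildB N k
theorem pv_sk_iff (N : Int) (k : Nat) (S : List (Std.HashSet Int))
    (hinv : ∀ j x, x ∈ S.getD j ∅ ↔ 1 ≤ j ∧ j < k ∧ x ∈ buildB N j) (x : Int) :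
    x ∈ (List.range' 1 (k - 1)).foldl (fun acc i =>
        (S.getD i ∅).toList.foldl (fun acc a =>
          (S.getD (k - i) ∅).toList.foldl (fun acc b => pvAddOps acc a b) acc) acc)
      ((S.getD k ∅).insert (pvRep N k)) ↔ x ∈ buildB N k := by
  rw [pv_mem_fold_i, pv_mem_buildB, Std.HashSet.mem_insert]
  simp only [Std.HashSet.mem_toList, beq_iff_eq]
  constructor
  · rintro ((hx | hx) | ⟨i, hi, a, ha, b, hb, hc⟩)
    · exact Or.inl hx.symm
    · rw [hinv] at hx; omega
    · have hi' := hi; rw [List.mem_range'_1] at hi'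
      rw [hinv] at ha hb
      exact Or.inr ⟨i, hi, a, ha.2.2, b, hb.2.2, hc⟩
  · rintro (hx | ⟨i, hi, a, ha, b, hb, hc⟩)
    · exact Or.inl (Or.inl hx.symm)
    · have hi' := hi; rw [List.mem_range'_1] at hi'
      refine Or.inr ⟨i, hi, a, ?_, b, ?_, hc⟩
      · rw [hinv]; exact ⟨by omega, by omega, ha⟩
      · rw [hinv]; exact ⟨by omega, by omega, hb⟩

theorem pv_loop_eq_scan (N number : Int) (m : Nat) :
    ∀ k S, m = 9 - k → 1 ≤ k → S.length = 9 →
      (∀ j x, x ∈ S.getD j ∅ ↔ 1 ≤ j ∧ j < k ∧ x ∈ buildB N j) →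
      solutionLoop N number S k = scanB N number k := by
  induction m with
  | zero =>
    intro k S hm _ _ _
    have hk : k ≥ 9 := by omega
    rw [solutionLoop, scanB, if_pos hk, if_pos hk]
  | succ m ih =>
    intro k S hm hk1 hlen hinv
    have hk : ¬ k ≥ 9 := by omega
    rw [solutionLoop, scanB, if_neg hk, if_neg hk]
    simp only []
    have hc : ((List.range' 1 (k - 1)).foldl (fun acc i =>
        (S.getD i ∅).toList.foldl (fun acc a =>
          (S.getD (k - i) ∅).toList.foldl (fun acc b => pvAddOps acc a b) acc) acc)
      ((S.getD k ∅).insert (pvRep N k))).contains number = (buildB N k).contains number := by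
    {
      rw [Bool.eq_iff_iff]
      constructor
      · intro h
        exact Std.HashSet.mem_iff_contains.mp
          ((pv_sk_iff N k S hinv number).mp (Std.HashSet.mem_iff_contains.mpr h))
      · intro h
        exact Std.HashSet.mem_iff_contains.mp
          ((pv_sk_iff N k S hinv number).mpr (Std.HashSet.mem_iff_contains.mpr h))
    }
    rw [hc]
    by_cases hmem : (buildB N k).contains number = true
    · rw [if_pos hmem, if_pos hmem]
    · rw [if_neg hmem, if_neg hmem]
      apply ih
      · omega
      · omega
      · simp [hlen]
      intro j x
      by_cases hj : j = k
      · subst hj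
        rw [List.getD_eq_getElem?_getD, List.getElem?_set_self (by omega),
            Option.getD_some, pv_sk_iff N j S hinv]
        constructor
        · intro h; exact ⟨by omega, by omega, h⟩
        · rintro ⟨_, _, h⟩; exact h
      · rw [List.getD_eq_getElem?_getD, List.getElem?_set_ne (by omega),
            ← List.getD_eq_getElem?_getD, hinv]
        constructor
        · rintro ⟨h1, h2, h3⟩; exact ⟨h1, by omega, h3⟩
        · rintro ⟨h1, h2, h3⟩; exact ⟨h1, by omega, h3⟩

-- ===== VERDICT (by name: the statement is the Claim_ definition above) =====
theorem solution_spec : Claim_equal_solution := by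
  intro N number _ _
  unfold Spec_solution solution solution_alt
  by_cases h : N = number
  · rw [if_pos h, if_pos h]
  · rw [if_neg h, if_neg h]
    apply pv_loop_eq_scan N number 8 1 _ rfl (by omega) (by simp)
    intro j x
    have hrep : (List.replicate 9 (∅ : Std.HashSet Int)).getD j ∅ = ∅ := by
      rw [List.getD_eq_getElem?_getD, List.getElem?_replicate]
      split <;> rfl
    rw [hrep]
    simp only [Std.HashSet.not_mem_empty, false_iff]
    rintro ⟨h1, h2, _⟩; omega
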